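-- pv_equiv track=rewrite | github.com/mazhewitt/TypoFixerTraining | scripts/quality_validator.py | count_consecutive_errors
-- ===== SOURCE A (Python) =====
-- from typing import List, Dict, Tuple, Optional, Set
--
-- def count_consecutive_errors(clean_words: List[str], corrupted_words: List[str]) -> int:
--     """Count maximum consecutive errors in a row"""
--
--     if len(clean_words) != len(corrupted_words):
--         return len(clean_words)  # All considered errors if different lengths
--
--     max_consecutive = 0
--     current_consecutive = 0
--
--     for clean_word, corrupted_word in zip(clean_words, corrupted_words):
--         if clean_word != corrupted_word:
--             current_consecutive += 1
--             max_consecutive = max(max_consecutive, current_consecutive)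
--         else:
--             current_consecutive = 0
--
--     return max_consecutive
-- ===== SOURCE B (Python) =====
-- from itertools import groupby
-- from typing import List
--
-- def count_consecutive_errors(clean_words: List[str], corrupted_words: List[str]) -> int:
--     """Count maximum consecutive errors in a row"""
--     if len(clean_words) != len(corrupted_words):
--         return len(clean_words)
--     flags = [c != d for c, d in zip(clean_words, corrupted_words)]
--     return max((sum(1 for _ in g) for key, g in groupby(flags) if key), default=0)
-- ===== Notes on version B (the rewrite author's own statement) =====
-- stated objective: idiomatic
-- what changed: Replaces the inline max/current counter loop by a two-stage pipeline: a mismatch-flag list built with zip, then run-length grouping via itertools.groupby with max(..., default=0) over the True runs.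
import Mathlib
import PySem

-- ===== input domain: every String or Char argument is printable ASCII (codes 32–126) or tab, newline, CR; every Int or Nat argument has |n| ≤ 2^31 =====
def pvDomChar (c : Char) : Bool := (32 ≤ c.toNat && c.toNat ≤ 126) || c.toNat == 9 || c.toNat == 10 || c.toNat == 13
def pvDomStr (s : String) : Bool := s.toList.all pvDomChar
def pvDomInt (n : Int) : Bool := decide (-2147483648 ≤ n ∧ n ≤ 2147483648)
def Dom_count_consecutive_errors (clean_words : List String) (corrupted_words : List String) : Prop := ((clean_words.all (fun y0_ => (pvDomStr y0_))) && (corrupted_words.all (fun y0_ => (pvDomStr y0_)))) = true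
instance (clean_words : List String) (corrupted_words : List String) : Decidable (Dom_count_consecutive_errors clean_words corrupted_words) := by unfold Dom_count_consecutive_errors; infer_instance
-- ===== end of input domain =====

-- B: flag-list + groupby run-length pipeline instead of A's inline max/current counters (idiomatic decomposition; same O(n) cost).
-- ===== PORT A =====
def count_consecutive_errors (clean_words : List String) (corrupted_words : List String) : Int :=
  if clean_words.length ≠ corrupted_words.length then (clean_words.length : Int)
  else
    let st := (clean_words.zip corrupted_words).foldl
      (fun (s : Int × Int) (p : String × String) =>
        if p.1 ≠ p.2 then (max s.1 (s.2 + 1), s.2 + 1) else (s.1, 0))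
      (0, 0)
    st.1

-- ===== PORT B =====
-- itertools.groupby on the Bool flag list = run-length encoding (value, run length)
def pvRle : List Bool → List (Bool × Int)
  | [] => []
  | b :: t =>
    match pvRle t with
    | (b', n) :: rest => if b = b' then (b, n + 1) :: rest else (b, 1) :: (b', n) :: rest
    | [] => [(b, 1)]

-- max(..., default=0) over the lengths of the True runs
def pvMaxTrue : List (Bool × Int) → Int
  | [] => 0
  | (b, n) :: rest => if b then max n (pvMaxTrue rest) else pvMaxTrue rest

def count_consecutive_errors_alt (clean_words : List String) (corrupted_words : List String) : Int :=
  if clean_words.length ≠ corrupted_words.length then (clean_words.length : Int)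
  else
    let flags := List.zipWith (fun c d => decide (c ≠ d)) clean_words corrupted_words
    pvMaxTrue (pvRle flags)

-- ===== PRECONDITION & SPEC =====
def Spec_count_consecutive_errors (clean_words : List String) (corrupted_words : List String) (out : Int) : Prop := out = count_consecutive_errors_alt clean_words corrupted_words
instance (clean_words : List String) (corrupted_words : List String) (out : Int) : Decidable (Spec_count_consecutive_errors clean_words corrupted_words out) := by unfold Spec_count_consecutive_errors; infer_instance

-- ===== CLAIM (what is proved, stated in full; the proofs are below) =====
def Claim_equal_count_consecutive_errors : Prop := ∀ (clean_words : List String) (corrupted_words : List String), Dom_count_consecutive_errors clean_words corrupted_words → Spec_count_consecutive_errors clean_words corrupted_words (count_consecutive_errors clean_words corrupted_words)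

-- ===== LEMMAS AND PROOFS =====

-- abstract A's loop over the flag list
def pvStepA (s : Int × Int) (b : Bool) : Int × Int :=
  if b then (max s.1 (s.2 + 1), s.2 + 1) else (s.1, 0)

lemma zip_fold_eq_flag_fold : ∀ (c d : List String) (s : Int × Int),
    (c.zip d).foldl
      (fun (s : Int × Int) (p : String × String) =>
        if p.1 ≠ p.2 then (max s.1 (s.2 + 1), s.2 + 1) else (s.1, 0)) s
      = (List.zipWith (fun x y => decide (x ≠ y)) c d).foldl pvStepA s := by
  intro c
  induction c with
  | nil => intro d s; cases d <;> rfl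
  | cons x xs ih =>
    intro d s
    cases d with
    | nil => rfl
    | cons y ys =>
      simp only [List.zip_cons_cons, List.zipWith_cons_cons, List.foldl_cons]
      by_cases hxy : x = y
      · simpa [hxy, pvStepA] using ih ys (s.1, 0)
      · simpa [hxy, pvStepA] using ih ys (max s.1 (s.2 + 1), s.2 + 1)

-- the value of A's fold as a function of the current-run counter
def pvG (cur : Int) : List Bool → Int
  | [] => 0
  | true :: t => max (cur + 1) (pvG (cur + 1) t)
  | false :: t => pvG 0 t

lemma foldA_fst (flags : List Bool) : ∀ mx cur : Int, 0 ≤ mx →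
    (flags.foldl pvStepA (mx, cur)).1 = max mx (pvG cur flags) := by
  induction flags with
  | nil => intro mx cur hmx; simp [pvG]; omega
  | cons b t ih =>
    intro mx cur hmx
    cases b
    · rw [List.foldl_cons, show pvStepA (mx, cur) false = (mx, 0) from rfl,
        ih mx 0 hmx]
      simp only [pvG]
    · rw [List.foldl_cons,
        show pvStepA (mx, cur) true = (max mx (cur + 1), cur + 1) from rfl,
        ih _ _ (by omega)]
      simp only [pvG]
      omega

-- every run produced by pvRle has length ≥ 1
lemma pvRle_head_pos : ∀ (l : List Bool) (b : Bool) (n : Int) (rest : List (Bool × Int)),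
    pvRle l = (b, n) :: rest → 1 ≤ n := by
  intro l
  induction l with
  | nil => intro b n rest h; simp [pvRle] at h
  | cons a t ih =>
    intro b n rest h
    rw [pvRle] at h
    rcases hr : pvRle t with _ | ⟨⟨b', m⟩, r⟩ <;> rw [hr] at h
    · simp at h; omega
    · have hm := ih b' m r hr
      by_cases hab : a = b' <;> simp [hab] at h <;> omega

lemma pvMaxTrue_nonneg : ∀ rs : List (Bool × Int), 0 ≤ pvMaxTrue rs := by
  intro rs
  induction rs with
  | nil => simp [pvMaxTrue]
  | cons p r ih =>
    rcases p with ⟨b, n⟩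
    cases b <;> simp only [pvMaxTrue] <;> omega

-- add cur to the leading True run
def pvBump (cur : Int) : List (Bool × Int) → List (Bool × Int)
  | (true, n) :: rest => (true, n + cur) :: rest
  | rs => rs

lemma g_eq_bump (flags : List Bool) : ∀ cur : Int,
    pvG cur flags = pvMaxTrue (pvBump cur (pvRle flags)) := by
  induction flags with
  | nil => intro cur; simp [pvG, pvRle, pvBump, pvMaxTrue]
  | cons b t ih =>
    intro cur
    rcases hr : pvRle t with _ | ⟨⟨b', n⟩, rest⟩
    · cases b
      · rw [pvG, ih 0, pvRle, hr]; simp [pvBump, pvMaxTrue]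
      · rw [pvG, ih (cur + 1), pvRle, hr]; simp [pvBump, pvMaxTrue]; omega
    · cases b
      · -- false head: drop the current run
        rw [pvG, ih 0, pvRle, hr]
        cases b' <;> simp [pvBump, pvMaxTrue]
      · -- true head: extend the current run
        rw [pvG, ih (cur + 1), pvRle, hr]
        cases b'
        · simp [pvBump, pvMaxTrue]; omega
        · have hn := pvRle_head_pos t true n rest hr
          simp [pvBump, pvMaxTrue]; omega

-- ===== VERDICT (by name: the statement is the Claim_ definition above) =====
theorem count_consecutive_errors_spec : Claim_equal_count_consecutive_errors := by
  intro c d _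
  unfold Spec_count_consecutive_errors count_consecutive_errors count_consecutive_errors_alt
  by_cases h : c.length = d.length
  · simp only [h, ne_eq, not_true_eq_false, if_false]
    rw [zip_fold_eq_flag_fold, foldA_fst _ 0 0 le_rfl, g_eq_bump]
    rcases hr : pvRle (List.zipWith (fun x y => decide (x ≠ y)) c d) with _ | ⟨⟨b', n⟩, rest⟩
    · simp [pvBump, pvMaxTrue]
    · cases b'
      · have := pvMaxTrue_nonneg ((false, n) :: rest)
        simp only [pvBump]
        omega
      · have hn := pvRle_head_pos _ true n rest hr
        have hrest := pvMaxTrue_nonneg rest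
        simp [pvBump, pvMaxTrue]
        omega
  · simp [h]
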